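-- pv_equiv track=rewrite | github.com/shamira-venturini/ICL-PILOT | src/icl_pilot/syntax_features.py | _safe_depth
-- ===== SOURCE A (Python) =====
-- def _safe_depth(index: int, head_map: dict[int, int], relation_map: dict[int, str], cache: dict[int, int], stack: set[int]) -> int:
--     if index in cache:
--         return cache[index]
--     if index in stack:
--         cache[index] = 0
--         return 0
--     relation = relation_map.get(index, "")
--     head = head_map.get(index, index)
--     if relation == "ROOT" or head == index or head == 0:
--         cache[index] = 0
--         return 0
--     stack.add(index)
--     depth = 1 + _safe_depth(head, head_map, relation_map, cache, stack)
--     stack.remove(index)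
--     cache[index] = depth
--     return depth
-- ===== SOURCE B (Python) =====
-- def _safe_depth(index: int, head_map: dict[int, int], relation_map: dict[int, str], cache: dict[int, int], stack: set[int]) -> int:
--     # One boolean terminal test drives a counting walk; the base comes from a
--     # unified cache lookup at the terminal, then the path is back-filled.
--     on_path, path = set(), []
--     node, steps = index, 0
--     while not (node in cache or node in stack or node in on_path
--                or relation_map.get(node, "") == "ROOT"
--                or head_map.get(node, node) == node
--                or head_map.get(node, node) == 0):
--         on_path.add(node)
--         path.append(node)
--         node = head_map.get(node, node)
--         steps += 1
--     if node not in cache: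
--         cache[node] = 0
--     base = cache[node]
--     d = base
--     for n in reversed(path):
--         d += 1
--         cache[n] = d
--     return base + steps
-- ===== Notes on version B (the rewrite author's own statement) =====
-- stated objective: alternative
-- what changed: Replaces the recursive descent (ordered if-chain, call-stack unwind) by an iterative counting walk driven by a single short-circuit boolean terminal test, with the base taken from one unified cache lookup at the terminal node and depth = base + step count.
import Mathlib
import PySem

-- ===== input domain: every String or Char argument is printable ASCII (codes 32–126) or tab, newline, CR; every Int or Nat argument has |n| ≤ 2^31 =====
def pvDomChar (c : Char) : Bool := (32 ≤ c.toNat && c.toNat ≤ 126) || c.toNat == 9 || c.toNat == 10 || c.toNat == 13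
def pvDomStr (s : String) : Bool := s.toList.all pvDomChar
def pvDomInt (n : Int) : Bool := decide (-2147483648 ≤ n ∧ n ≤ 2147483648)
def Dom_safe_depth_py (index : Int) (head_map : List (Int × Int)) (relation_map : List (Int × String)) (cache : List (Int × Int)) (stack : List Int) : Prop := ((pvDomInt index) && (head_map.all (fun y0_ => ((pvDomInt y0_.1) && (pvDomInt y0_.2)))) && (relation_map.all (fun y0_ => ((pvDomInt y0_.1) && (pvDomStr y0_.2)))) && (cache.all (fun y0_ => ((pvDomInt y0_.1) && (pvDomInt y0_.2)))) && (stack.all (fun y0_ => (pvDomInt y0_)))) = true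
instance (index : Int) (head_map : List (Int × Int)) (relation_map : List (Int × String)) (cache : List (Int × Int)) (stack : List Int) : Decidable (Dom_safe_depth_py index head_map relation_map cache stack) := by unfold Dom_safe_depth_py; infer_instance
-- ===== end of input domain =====

-- B replaces A's recursive descent (ordered if-chain + unwind) by a counting walk driven by a
-- single boolean terminal test, with the base taken from one unified cache lookup at the
-- terminal node; only the RETURN value is claimed here (in Python B also reproduces A's
-- cache writes and leaves the stack unchanged). Each port carries a fuel counter
-- (head_map.length + 1) solely to make the same computation total; it never runs out on
-- actual runs, since each step consumes a distinct key of head_map.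

-- ===== PORT A =====
-- recursive descent, literal transliteration of _safe_depth (cache writes are side effects
-- that the return value never reads during the descent, so they are not threaded)
def pvAGo (fuel : Nat) (index : Int) (hm : PySem.Dict Int Int) (rm : PySem.Dict Int String)
    (cache : PySem.Dict Int Int) (stack : PySem.Set Int) : Int :=
  match fuel with
  | 0 => 0
  | Nat.succ fuel =>
    if PySem.Dict.contains cache index then PySem.Dict.getD cache index 0
    else if PySem.Set.contains stack index then 0
    else
      let relation := PySem.Dict.getD rm index ""
      let head := PySem.Dict.getD hm index index
      if relation == "ROOT" || head == index || head == 0 then 0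
      else 1 + pvAGo fuel head hm rm cache (PySem.Set.add stack index)

def safe_depth_py (index : Int) (head_map : List (Int × Int)) (relation_map : List (Int × String)) (cache : List (Int × Int)) (stack : List Int) : Int :=
  pvAGo (head_map.length + 1) index (PySem.Dict.ofList head_map) (PySem.Dict.ofList relation_map)
    (PySem.Dict.ofList cache) (PySem.Set.ofList stack)

-- ===== PORT B =====
-- B's while-loop: is the current node terminal? (one boolean test, same short-circuit order)
def pvBStop (node : Int) (hm : PySem.Dict Int Int) (rm : PySem.Dict Int String)
    (cache : PySem.Dict Int Int) (stack : PySem.Set Int) (onPath : PySem.Set Int) : Bool :=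
  PySem.Dict.contains cache node || PySem.Set.contains stack node
    || PySem.Set.contains onPath node || PySem.Dict.getD rm node "" == "ROOT"
    || PySem.Dict.getD hm node node == node || PySem.Dict.getD hm node node == 0

-- the walk: terminal node (none = fuel ran out) and the number of steps taken
def pvBWalk (fuel : Nat) (node : Int) (hm : PySem.Dict Int Int) (rm : PySem.Dict Int String)
    (cache : PySem.Dict Int Int) (stack : PySem.Set Int) (onPath : PySem.Set Int) :
    Option Int × Nat :=
  match fuel with
  | 0 => (none, 0)
  | Nat.succ fuel =>
    if pvBStop node hm rm cache stack onPath then (some node, 0)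
    else
      let r := pvBWalk fuel (PySem.Dict.getD hm node node) hm rm cache stack
        (PySem.Set.add onPath node)
      (r.1, r.2 + 1)

def safe_depth_py_alt (index : Int) (head_map : List (Int × Int)) (relation_map : List (Int × String)) (cache : List (Int × Int)) (stack : List Int) : Int :=
  let c := PySem.Dict.ofList cache
  let r := pvBWalk (head_map.length + 1) index (PySem.Dict.ofList head_map)
    (PySem.Dict.ofList relation_map) c (PySem.Set.ofList stack) PySem.Set.empty
  let base := match r.1 with
  | some t => PySem.Dict.getD c t 0
  | none => 0
  base + (r.2 : Int)

-- ===== PRECONDITION & SPEC =====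
def Spec_safe_depth_py (index : Int) (head_map : List (Int × Int)) (relation_map : List (Int × String)) (cache : List (Int × Int)) (stack : List Int) (out : Int) : Prop := out = safe_depth_py_alt index head_map relation_map cache stack
instance (index : Int) (head_map : List (Int × Int)) (relation_map : List (Int × String)) (cache : List (Int × Int)) (stack : List Int) (out : Int) : Decidable (Spec_safe_depth_py index head_map relation_map cache stack out) := by unfold Spec_safe_depth_py; infer_instance

-- ===== CLAIM (what is proved, stated in full; the proofs are below) =====
def Claim_equal_safe_depth_py : Prop := ∀ (index : Int) (head_map : List (Int × Int)) (relation_map : List (Int × String)) (cache : List (Int × Int)) (stack : List Int), Dom_safe_depth_py index head_map relation_map cache stack → Spec_safe_depth_py index head_map relation_map cache stack (safe_depth_py index head_map relation_map cache stack)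

-- ===== LEMMAS AND PROOFS =====

-- Bool form of PySem.Set.mem_add, used to push the membership equivalence through Set.add
lemma pv_contains_add (s : PySem.Set Int) (x n : Int) :
    PySem.Set.contains (PySem.Set.add s x) n = (PySem.Set.contains s n || n == x) := by
  rw [Bool.eq_iff_iff]
  simp [PySem.Set.mem_add, Bool.or_eq_true]

-- core invariant: A's recursion equals B's step count plus the cache base at B's terminal,
-- provided A's live stack has the same members as B's (fixed stack ∪ growing on-path set)
lemma pv_walk_eq (fuel : Nat) : ∀ (node : Int) (hm : PySem.Dict Int Int)
    (rm : PySem.Dict Int String) (cache : PySem.Dict Int Int)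
    (stackA stack onPath : PySem.Set Int),
    (∀ n : Int, PySem.Set.contains stackA n
        = (PySem.Set.contains stack n || PySem.Set.contains onPath n)) →
    pvAGo fuel node hm rm cache stackA
      = (match (pvBWalk fuel node hm rm cache stack onPath).1 with
          | some t => PySem.Dict.getD cache t 0
          | none => 0)
        + ((pvBWalk fuel node hm rm cache stack onPath).2 : Int) := by
  induction fuel with
  | zero => intro node hm rm cache stackA stack onPath h; simp [pvAGo, pvBWalk]
  | succ fuel ih =>
    intro node hm rm cache stackA stack onPath h
    simp only [pvAGo, pvBWalk, pvBStop]
    rw [h node]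
    by_cases hc : PySem.Dict.contains cache node = true
    · simp [hc]
    · have hget : PySem.Dict.getD cache node 0 = 0 :=
        PySem.Dict.getD_of_not_contains _ _ (by simpa using hc)
      simp only [hc, Bool.false_eq_true, if_false]
      by_cases hs : (PySem.Set.contains stack node || PySem.Set.contains onPath node) = true
      · have hsP : node ∈ stack ∨ node ∈ onPath := by simpa using hs
        rw [if_pos hs, if_pos (by rcases hsP with h' | h' <;> simp [h'])]
        simp [hget]
      · rw [Bool.not_eq_true, Bool.or_eq_false_iff] at hs
        obtain ⟨hs1, hs2⟩ := hs
        have hs1' : node ∉ stack := by simpa using hs1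
        have hs2' : node ∉ onPath := by simpa using hs2
        by_cases hr : (PySem.Dict.getD rm node "" == "ROOT"
            || PySem.Dict.getD hm node node == node
            || PySem.Dict.getD hm node node == 0) = true
        · have hrP : (PySem.Dict.getD rm node "" = "ROOT" ∨ PySem.Dict.getD hm node node = node)
              ∨ PySem.Dict.getD hm node node = 0 := by simpa using hr
          rw [if_neg (by simp [hs1', hs2']), if_pos hr, if_pos (by rcases hrP with (h' | h') | h' <;> simp [h'])]
          simp [hget]
        · rw [Bool.not_eq_true, Bool.or_eq_false_iff, Bool.or_eq_false_iff] at hr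
          obtain ⟨⟨hr1, hr2⟩, hr3⟩ := hr
          have hr1' : ¬ PySem.Dict.getD rm node "" = "ROOT" := by simpa using hr1
          have hr2' : ¬ PySem.Dict.getD hm node node = node := by simpa using hr2
          have hr3' : ¬ PySem.Dict.getD hm node node = 0 := by simpa using hr3
          rw [if_neg (by simp [hs1', hs2']), if_neg (by simp [hr1', hr2', hr3']),
            if_neg (by simp [hs1', hs2', hr1', hr2', hr3'])]
          rw [ih (PySem.Dict.getD hm node node) hm rm cache
              (PySem.Set.add stackA node) stack (PySem.Set.add onPath node)
              (by
                intro n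
                rw [pv_contains_add, pv_contains_add, h n]
                cases PySem.Set.contains stack n <;>
                  cases PySem.Set.contains onPath n <;> simp)]
          push_cast
          ring

-- ===== VERDICT (by name: the statement is the Claim_ definition above) =====
theorem safe_depth_py_spec : Claim_equal_safe_depth_py := by
  intro index head_map relation_map cache stack _
  unfold Spec_safe_depth_py safe_depth_py safe_depth_py_alt
  rw [pv_walk_eq (head_map.length + 1) index (PySem.Dict.ofList head_map)
      (PySem.Dict.ofList relation_map) (PySem.Dict.ofList cache)
      (PySem.Set.ofList stack) (PySem.Set.ofList stack) PySem.Set.empty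
      (by intro n; simp [PySem.Set.empty, PySem.Set.contains])]
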